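-- pv_equiv track=rewrite | github.com/erlinssl/IDATT2502-Machine-Learning | Project/src/kautenja/jordi/jordi_modules/tetris_util.py | _get_tops
-- ===== SOURCE A (Python) =====
-- def _get_tops(state):
--     tops = []
--     for x in range(len(state[0])):
--         flag = True
--         for y in range(len(state)):
--             if state[y][x] == 0:
--                 continue
--             tops.append(y)
--             flag = False
--             break
--         if flag:
--             tops.append(20)  # if column had no collisions, top is bottom
--     return tops
-- ===== SOURCE B (Python) =====
-- def _get_tops(state):
--     w = len(state[0])
--     tops = [20] * w
--     found = set()
--     for y, row in enumerate(state):
--         for x in range(w):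
--             if row[x] != 0 and x not in found:
--                 tops[x] = y
--                 found.add(x)
--     return tops
-- ===== Notes on version B (the rewrite author's own statement) =====
-- stated objective: alternative
-- what changed: Replaces the column-major scan with a per-column flag/break by a single row-major top-to-bottom scan that keeps a tops array pre-filled with 20 and a set of already-resolved columns.
-- outside the precondition, e.g. on _get_tops([[1, 1], [5]]): A returns [0, 0], B raises IndexError
import Mathlib
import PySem

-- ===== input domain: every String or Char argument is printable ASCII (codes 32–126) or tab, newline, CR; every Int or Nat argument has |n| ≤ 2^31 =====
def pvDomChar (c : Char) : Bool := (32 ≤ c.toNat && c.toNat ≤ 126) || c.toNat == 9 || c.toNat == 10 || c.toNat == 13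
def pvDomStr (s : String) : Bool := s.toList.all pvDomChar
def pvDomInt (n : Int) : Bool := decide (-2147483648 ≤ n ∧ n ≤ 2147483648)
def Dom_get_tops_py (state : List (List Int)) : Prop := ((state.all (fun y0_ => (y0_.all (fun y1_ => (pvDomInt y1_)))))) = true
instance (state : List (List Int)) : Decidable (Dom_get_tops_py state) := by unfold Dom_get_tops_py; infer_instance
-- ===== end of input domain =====

-- B replaces A's column-major scan (per-column flag and break) by a single row-major
-- top-to-bottom scan over a pre-filled tops array and a set of resolved columns
-- (objective: alternative traversal, same asymptotic cost).

-- ===== PORT A =====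
def get_tops_py (state : List (List Int)) : List Int :=
  let w := (PySem.List.pyGetD state 0 []).length
  (List.range w).foldl (fun tops (x : Nat) =>
    let r := (List.range state.length).foldl
      (fun (acc : List Int × Bool) (y : Nat) =>
        if acc.2 = true then
          if PySem.List.pyGetD (PySem.List.pyGetD state (y : Int) []) (x : Int) 0 = 0 then acc
          else (acc.1 ++ [(y : Int)], false)
        else acc)
      (tops, true)
    if r.2 = true then r.1 ++ [(20 : Int)] else r.1) []

-- ===== PORT B =====
def get_tops_py_alt (state : List (List Int)) : List Int :=
  let w := (PySem.List.pyGetD state 0 []).length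
  ((PySem.List.enumerate state 0).foldl
    (fun (acc : List Int × PySem.Set Nat) p =>
      (List.range w).foldl
        (fun (acc : List Int × PySem.Set Nat) (x : Nat) =>
          if PySem.List.pyGetD p.2 (x : Int) 0 ≠ 0 ∧ PySem.Set.contains acc.2 x = false then
            (PySem.List.pySetD acc.1 (x : Int) p.1, PySem.Set.add acc.2 x)
          else acc)
        acc)
    (List.replicate w (20 : Int), (PySem.Set.empty : PySem.Set Nat))).1

-- ===== PRECONDITION & SPEC =====
-- Pre_ excludes the empty grid (state[0] raises IndexError in both programs) and ragged
-- grids whose later rows are shorter than the first row: both programs index every row up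
-- to the first row's width, so a short row raises IndexError when reached — whether A
-- reaches it depends on where the nonzero cells happen to lie, while B always reaches it.
def Pre_get_tops_py (state : List (List Int)) : Prop :=
  state ≠ [] ∧ ∀ r ∈ state, (state.headD []).length ≤ r.length
instance (state : List (List Int)) : Decidable (Pre_get_tops_py state) := by
  unfold Pre_get_tops_py; infer_instance
def pvWitness_get_tops_py : List (List Int) := [[0, 1], [2, 0]]
def Spec_get_tops_py (state : List (List Int)) (out : List Int) : Prop := out = get_tops_py_alt state
instance (state : List (List Int)) (out : List Int) : Decidable (Spec_get_tops_py state out) := by unfold Spec_get_tops_py; infer_instance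

-- ===== CLAIM (what is proved, stated in full; the proofs are below) =====
def Claim_equal_get_tops_py : Prop := ∀ (state : List (List Int)), Dom_get_tops_py state → Pre_get_tops_py state → Spec_get_tops_py state (get_tops_py state)

-- ===== LEMMAS AND PROOFS =====

/-- first row index ≥ counter `i` whose cell in column `x` is nonzero, else 20. -/
def colT (x : Nat) : List (List Int) → Nat → Int
  | [], _ => 20
  | r :: rs, i => if r.getD x 0 ≠ 0 then (i : Int) else colT x rs (i + 1)

theorem colT_of_not_hit (x : Nat) (rows : List (List Int)) (i : Nat)
    (h : ∀ r ∈ rows, r.getD x 0 = 0) : colT x rows i = 20 := by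
  induction rows generalizing i with
  | nil => rfl
  | cons r rs ih =>
      have h0 : r.getD x 0 = 0 := h r (by simp)
      show (if r.getD x 0 ≠ 0 then (i : Int) else colT x rs (i + 1)) = 20
      rw [if_neg (by simpa [List.getD] using h0)]
      exact ih (i + 1) (fun r hr => h r (by simp [hr]))

theorem colT_append_of_not_hit (x : Nat) (rows : List (List Int)) (r : List Int) (i : Nat)
    (h : ∀ s ∈ rows, s.getD x 0 = 0) :
    colT x (rows ++ [r]) i = if r.getD x 0 ≠ 0 then ((i + rows.length : Nat) : Int) else 20 := by
  induction rows generalizing i with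
  | nil => simp [colT]
  | cons s rs ih =>
      have h0 : s.getD x 0 = 0 := h s (by simp)
      show (if s.getD x 0 ≠ 0 then (i : Int) else colT x (rs ++ [r]) (i + 1)) = _
      rw [if_neg (by simpa [List.getD] using h0)]
      rw [ih (i + 1) (fun t ht => h t (by simp [ht]))]
      split <;> simp <;> omega

theorem colT_append_of_hit (x : Nat) (rows rest : List (List Int)) (i : Nat)
    (h : ∃ s ∈ rows, s.getD x 0 ≠ 0) :
    colT x (rows ++ rest) i = colT x rows i := by
  induction rows generalizing i with
  | nil => simp at h
  | cons s rs ih =>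
      by_cases h0 : s.getD x 0 ≠ 0
      · show (if s.getD x 0 ≠ 0 then (i : Int) else _) = (if s.getD x 0 ≠ 0 then (i : Int) else _)
        rw [if_pos h0, if_pos h0]
      · show (if s.getD x 0 ≠ 0 then (i : Int) else colT x (rs ++ rest) (i + 1)) = _
        rw [if_neg h0]
        conv_rhs => rw [colT, if_neg h0]
        rw [not_not] at h0
        rcases h with ⟨t, ht, hne⟩
        rcases List.mem_cons.mp ht with rfl | ht'
        · exact absurd h0 hne
        · exact ih (i + 1) ⟨t, ht', hne⟩

-- A's inner loop over the rows of a fixed column x.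
theorem innerA (rows : List (List Int)) (x : Nat) (tops : List Int) :
    (List.range rows.length).foldl
      (fun (acc : List Int × Bool) (y : Nat) =>
        if acc.2 = true then
          if PySem.List.pyGetD (PySem.List.pyGetD rows (y : Int) []) (x : Int) 0 = 0 then acc
          else (acc.1 ++ [(y : Int)], false)
        else acc)
      (tops, true)
    = (tops ++ (if rows.any (fun r => r.getD x 0 != 0) then [colT x rows 0] else []),
       !rows.any (fun r => r.getD x 0 != 0)) := by
  induction rows using List.reverseRecOn with
  | nil => simp
  | append_singleton rs r ih =>
    have hlast : PySem.List.pyGetD (rs ++ [r]) ((rs.length : Nat) : Int) [] = r := by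
      simp [PySem.List.pyGetD_natCast, List.getD]
    have hcong : ∀ (acc : List Int × Bool) (y : Nat), y ∈ List.range rs.length →
        (if acc.2 = true then
          if PySem.List.pyGetD (PySem.List.pyGetD (rs ++ [r]) (y : Int) []) (x : Int) 0 = 0 then acc
          else (acc.1 ++ [(y : Int)], false)
        else acc)
        = (if acc.2 = true then
          if PySem.List.pyGetD (PySem.List.pyGetD rs (y : Int) []) (x : Int) 0 = 0 then acc
          else (acc.1 ++ [(y : Int)], false)
        else acc) := by
      intro acc y hy
      have hy' : y < rs.length := List.mem_range.mp hy
      simp [PySem.List.pyGetD_natCast, List.getD, List.getElem?_append_left hy']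
    rw [List.length_append, List.length_singleton, List.range_succ, List.foldl_append,
        PySem.List.foldl_congr_mem _ _ _ _ hcong, ih]
    by_cases hhit : rs.any (fun s => s.getD x 0 != 0) = true
    · have hex : ∃ s ∈ rs, s.getD x 0 ≠ 0 := by simpa using hhit
      have hany' : ∃ s ∈ rs, ¬ s[x]?.getD 0 = 0 := by simpa [List.getD] using hex
      have hany2 : (rs.any fun s => s[x]?.getD 0 != 0) = true := by
        simpa [List.getD] using hhit
      have hforall : ¬ ∀ s ∈ rs, s[x]?.getD 0 = 0 := by
        rcases hany' with ⟨s, hs, hne⟩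
        exact fun h => hne (h s hs)
      simp [hany2, List.any_append, colT_append_of_hit x rs [r] 0 hex, List.getD]
    · have hall : ∀ s ∈ rs, s.getD x 0 = 0 := by
        intro s hs
        by_contra hne
        exact hhit (List.any_eq_true.mpr ⟨s, hs, by simpa using hne⟩)
      have hall' : ∀ s ∈ rs, s[x]?.getD 0 = 0 := by simpa [List.getD] using hall
      have hnex : ¬ ∃ s ∈ rs, ¬ s[x]?.getD 0 = 0 := by
        rintro ⟨s, hs, hne⟩
        exact hne (hall' s hs)
      rw [colT_append_of_not_hit x rs r 0 hall]
      by_cases hr : r.getD x 0 = 0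
      · have hr' : r[x]?.getD 0 = 0 := by simpa [List.getD] using hr
        simp [List.any_append, hnex, hr', List.getD]
      · have hr' : ¬ r[x]?.getD 0 = 0 := by simpa [List.getD] using hr
        simp [List.any_append, hnex, hr', List.getD]
        rw [if_pos hall']
        simp [hr', bne_iff_ne]

-- B's inner loop over the columns of one row.
theorem innerB (r : List Int) (i : Int) (w : Nat) (k : Nat) (hk : k ≤ w)
    (f : Nat → Int) (found : PySem.Set Nat) :
    ∃ S' : PySem.Set Nat,
      (List.range k).foldl
        (fun (acc : List Int × PySem.Set Nat) (x : Nat) =>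
          if PySem.List.pyGetD r (x : Int) 0 ≠ 0 ∧ PySem.Set.contains acc.2 x = false then
            (PySem.List.pySetD acc.1 (x : Int) i, PySem.Set.add acc.2 x)
          else acc)
        ((List.range w).map f, found)
      = ((List.range w).map
           (fun x => if x < k ∧ r.getD x 0 ≠ 0 ∧ x ∉ found then i else f x), S')
      ∧ ∀ x : Nat, x ∈ S' ↔ x ∈ found ∨ (x < k ∧ r.getD x 0 ≠ 0) := by
  induction k with
  | zero => exact ⟨found, by simp, by simp⟩
  | succ k ihk =>
    obtain ⟨S', hfold, hS'⟩ := ihk (Nat.le_of_succ_le hk)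
    rw [List.range_succ, List.foldl_append, hfold]
    have hmemS' : k ∈ S' ↔ k ∈ found := by
      rw [hS' k]; simp
    by_cases hcond : r.getD k 0 ≠ 0 ∧ k ∉ found
    · refine ⟨PySem.Set.add S' k, ?_, ?_⟩
      · simp only [List.foldl_cons, List.foldl_nil]
        rw [if_pos ?side]
        case side =>
          constructor
          · simpa [PySem.List.pyGetD_natCast, List.getD] using hcond.1
          · rw [Bool.eq_false_iff, Ne, PySem.Set.contains_iff, hmemS']
            exact hcond.2
        refine Prod.ext ?_ rfl
        simp only [PySem.List.pySetD_natCast]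
        apply List.ext_getElem
        · simp
        · intro j hj1 hj2
          have hjw : j < w := by simpa using hj2
          rw [List.getElem_set]
          simp only [List.getElem_map, List.getElem_range]
          by_cases hjk : j = k
          · subst hjk
            rw [if_pos rfl, if_pos ⟨Nat.lt_succ_self j, hcond.1, hcond.2⟩]
          · rw [if_neg (fun h => hjk h.symm)]
            congr 1
            simp
            intro _ _
            omega
      · intro y
        rw [PySem.Set.mem_add, hS' y]
        constructor
        · rintro ((hy | ⟨h1, h2⟩) | rfl)
          · exact Or.inl hy
          · exact Or.inr ⟨by omega, h2⟩
          · exact Or.inr ⟨Nat.lt_succ_self y, hcond.1⟩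
        · rintro (hy | ⟨h1, h2⟩)
          · exact Or.inl (Or.inl hy)
          · by_cases hyk : y = k
            · exact Or.inr hyk
            · exact Or.inl (Or.inr ⟨by omega, h2⟩)
    · refine ⟨S', ?_, ?_⟩
      · simp only [List.foldl_cons, List.foldl_nil]
        rw [if_neg ?side]
        case side =>
          rintro ⟨h1, h2⟩
          apply hcond
          refine ⟨by simpa [PySem.List.pyGetD_natCast, List.getD] using h1, ?_⟩
          rw [Bool.eq_false_iff, Ne, PySem.Set.contains_iff, hmemS'] at h2
          exact h2
        congr 1
        apply List.map_congr_left
        intro a _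
        congr 1
        simp
        intro h1 h2
        have hak : a ≠ k := by
          intro he
          subst he
          exact hcond ⟨by simpa [List.getD] using h1, h2⟩
        omega
      · intro y
        rw [hS' y]
        constructor
        · rintro (hy | ⟨h1, h2⟩)
          · exact Or.inl hy
          · exact Or.inr ⟨by omega, h2⟩
        · rintro (hy | ⟨h1, h2⟩)
          · exact Or.inl hy
          · rcases Nat.lt_succ_iff_lt_or_eq.mp h1 with h | rfl
            · exact Or.inr ⟨h, h2⟩
            · by_cases hyf : y ∈ found
              · exact Or.inl hyf
              · exact absurd ⟨h2, hyf⟩ hcond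

-- B's outer loop over the rows.
theorem outerB (w : Nat) (rows : List (List Int)) (pre : List (List Int))
    (S : PySem.Set Nat)
    (hS : ∀ x : Nat, x ∈ S ↔ x < w ∧ ∃ s ∈ pre, s.getD x 0 ≠ 0) :
    ((PySem.List.enumerate rows (pre.length : Int)).foldl
      (fun (acc : List Int × PySem.Set Nat) p =>
        (List.range w).foldl
          (fun (acc : List Int × PySem.Set Nat) (x : Nat) =>
            if PySem.List.pyGetD p.2 (x : Int) 0 ≠ 0 ∧ PySem.Set.contains acc.2 x = false then
              (PySem.List.pySetD acc.1 (x : Int) p.1, PySem.Set.add acc.2 x)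
            else acc)
          acc)
      ((List.range w).map (fun x => colT x pre 0), S)).1
    = (List.range w).map (fun x => colT x (pre ++ rows) 0) := by
  induction rows generalizing pre S with
  | nil => simp [PySem.List.enumerate_nil]
  | cons r rs ih =>
    rw [PySem.List.enumerate_cons]
    simp only [List.foldl_cons]
    obtain ⟨S', hfold, hS'⟩ := innerB r (pre.length : Int) w w le_rfl (fun x => colT x pre 0) S
    rw [hfold]
    have hmap : ∀ a ∈ List.range w,
        (if a < w ∧ r.getD a 0 ≠ 0 ∧ a ∉ S then ((pre.length : Nat) : Int) else colT a pre 0)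
        = colT a (pre ++ [r]) 0 := by
      intro a ha
      have haw : a < w := List.mem_range.mp ha
      by_cases hhit : ∃ s ∈ pre, s.getD a 0 ≠ 0
      · have hmem : a ∈ S := (hS a).mpr ⟨haw, hhit⟩
        rw [if_neg (fun h => h.2.2 hmem), colT_append_of_hit a pre [r] 0 hhit]
      · have hall : ∀ s ∈ pre, s.getD a 0 = 0 := by
          intro s hs
          by_contra hne
          exact hhit ⟨s, hs, hne⟩
        have hnotS : a ∉ S := fun hmem => hhit ((hS a).mp hmem).2
        rw [colT_append_of_not_hit a pre r 0 hall]
        by_cases hra : r.getD a 0 ≠ 0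
        · rw [if_pos ⟨haw, hra, hnotS⟩, if_pos hra]
          norm_num
        · rw [if_neg (fun h => hra h.2.1), if_neg hra, colT_of_not_hit a pre 0 hall]
    rw [List.map_congr_left hmap]
    have hS'' : ∀ x : Nat, x ∈ S' ↔ x < w ∧ ∃ s ∈ pre ++ [r], s.getD x 0 ≠ 0 := by
      intro y
      rw [hS' y, hS y]
      constructor
      · rintro (⟨h1, h2⟩ | ⟨h1, h2⟩)
        · exact ⟨h1, by rcases h2 with ⟨s, hs, hne⟩; exact ⟨s, by simp [hs], hne⟩⟩
        · exact ⟨h1, ⟨r, by simp, h2⟩⟩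
      · rintro ⟨h1, s, hs, hne⟩
        rcases List.mem_append.mp hs with hs' | hs'
        · exact Or.inl ⟨h1, s, hs', hne⟩
        · exact Or.inr ⟨h1, by rwa [List.mem_singleton.mp hs'] at hne⟩
    have := ih (pre ++ [r]) S' hS''
    simp only [List.length_append, List.length_singleton, List.append_assoc,
      List.singleton_append] at this ⊢
    rw [← this]
    congr 2

theorem portA_eq_map (state : List (List Int)) :
    get_tops_py state
    = (List.range (PySem.List.pyGetD state 0 []).length).map (fun x => colT x state 0) := by
  unfold get_tops_py
  rw [PySem.List.foldl_congr_mem' _ _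
    (fun (tops : List Int) (x : Nat) => tops ++ [colT x state 0]) _ ?_]
  · rw [PySem.List.foldl_append_singleton_eq_map]
    simp
  · intro x _ tops
    rw [innerA state x tops]
    by_cases hhit : state.any (fun s => s.getD x 0 != 0) = true
    · have hex : ∃ s ∈ state, s.getD x 0 ≠ 0 := by simpa using hhit
      have hany' : ∃ s ∈ state, ¬ s[x]?.getD 0 = 0 := by simpa [List.getD] using hex
      have hforall : ¬ ∀ s ∈ state, s[x]?.getD 0 = 0 := by
        rcases hany' with ⟨s, hs, hne⟩
        exact fun h => hne (h s hs)
      simp [hany', hforall]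
    · have hall : ∀ s ∈ state, s.getD x 0 = 0 := by
        intro s hs
        by_contra hne
        exact hhit (List.any_eq_true.mpr ⟨s, hs, by simpa using hne⟩)
      have hall' : ∀ s ∈ state, s[x]?.getD 0 = 0 := by simpa [List.getD] using hall
      have hnex : ¬ ∃ s ∈ state, ¬ s[x]?.getD 0 = 0 := by
        rintro ⟨s, hs, hne⟩
        exact hne (hall' s hs)
      simp [hnex, colT_of_not_hit x state 0 hall]

theorem portB_eq_map (state : List (List Int)) :
    get_tops_py_alt state
    = (List.range (PySem.List.pyGetD state 0 []).length).map (fun x => colT x state 0) := by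
  simp only [get_tops_py_alt]
  have h0 : List.replicate (PySem.List.pyGetD state 0 []).length (20 : Int)
      = (List.range (PySem.List.pyGetD state 0 []).length).map (fun x => colT x ([] : List (List Int)) 0) := by
    simp [colT, List.map_const']
  rw [h0]
  have := outerB (PySem.List.pyGetD state 0 []).length state [] PySem.Set.empty
    (by intro x; simp [PySem.Set.empty])
  simpa using this

-- ===== VERDICT (by name: the statement is the Claim_ definition above) =====
theorem get_tops_py_spec : Claim_equal_get_tops_py := by
  intro state _ _
  unfold Spec_get_tops_py
  rw [portA_eq_map, portB_eq_map]
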